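-- pv_equiv track=rewrite | github.com/jbsera/6.0001-6.0002 | ps4b.py | make_shift_dict
-- ===== SOURCE A (Python) =====
-- import string
--
-- def make_shift_dict(input_shift, decrypt=False):
--     '''
--     Creates a dictionary that can be used to apply a cipher to a letter and number.
--
--     The dictionary maps every uppercase and lowercase letter to a
--     character shifted down the alphabet by the input shift, as well as
--     every number to one shifted down by the same amount. If 'a' is
--     shifted down by 2, the result is 'c' and '0' shifted down by 2 is '2'.
--
--     The dictionary should contain 62 keys of all the uppercase letters,
--     all the lowercase letters, and all numbers mapped to their shifted values.
--
--     input_shift: the amount by which to shift every letter of the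
--     alphabet and every number (0 <= shift < 26)
--
--     decrypt: if the shift dict will be used for decrypting. affects digit shift function
--
--     Returns: a dictionary mapping letter/number (string) to
--              another letter/number (string).
--     '''
--     if decrypt==True: #if you are trying to decrypt, you'll want your input shift to go backwards
--         input_shift=-input_shift
--     shift_dict={} #initializing dictionaries and empty lists
--     lower_case_letters=[]
--     upper_case_letters=[]
--     numbers=[]
--     for letter in string.ascii_lowercase: #for the lowercase letters
--         lower_case_letters.append(letter) #add each letter to a list of lowercase letters
--         lower_case_copy=lower_case_letters[:] #make a copy of that list
--     for index in range(len(lower_case_letters)):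
--         lower_case_copy[index]=lower_case_letters[(index+input_shift)%26] #mutate the copied list by changing it's letters to the new index after the input shift has been applied. The %26 takes care of looping around the alphabet.
--     for letter in string.ascii_uppercase: #do the same thing for uppercase letters as we did for lowercase letters
--         upper_case_letters.append(letter)
--         upper_case_copy=upper_case_letters[:]
--     for index in range(len(upper_case_letters)):
--         upper_case_copy[index]=upper_case_letters[(index+input_shift)%26]
--     for number in string.digits: #make a list of numbers and make a copy of that list
--         numbers.append(number)
--         numbers_copy=numbers[:]
--     for index in range(len(numbers)): #mutate the copied list by changing the index in the copy to the new index in the original list after the input shift has been applied. The %10 takes care of looping around the digits like from 9 to 0 for example.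
--         numbers_copy[index]=numbers[(index+input_shift)%10]
--     for index in range(len(lower_case_letters)): #add all the lowercase letters into the dictionary as keys with their associated values being their shift values from the mutated list
--         shift_dict[lower_case_letters[index]]=lower_case_copy[index]
--     for index in range(len(upper_case_letters)): #add all the uppercase letters into the dictionary as keys with their associated values being their shift values from the mutated list
--         shift_dict[upper_case_letters[index]]=upper_case_copy[index]
--     for index in range(len(numbers)):#add all the numbers into the dictionary as keys with their associated values being their shift values from the mutated list
--         shift_dict[numbers[index]]=numbers_copy[index]
--     return shift_dict #return the shifted dictionary
-- ===== SOURCE B (Python) =====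
-- import string
--
-- def make_shift_dict(input_shift, decrypt=False):
--     shift = -input_shift if decrypt else input_shift
--     shift_dict = {}
--     for alphabet, size in ((string.ascii_lowercase, 26),
--                            (string.ascii_uppercase, 26),
--                            (string.digits, 10)):
--         k = shift % size
--         rotated = alphabet[k:] + alphabet[:k]
--         shift_dict.update(zip(alphabet, rotated))
--     return shift_dict
-- ===== Notes on version B (the rewrite author's own statement) =====
-- stated objective: simpler
-- what changed: Replaces A's per-index (i+shift)%26 / %10 writes into mutated list copies and three index-driven dict-filling loops by rotating each whole alphabet with slices (alpha[k:]+alpha[:k], k = shift % size) and building the dict from zip(alphabet, rotated) in one loop over the three alphabets.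
import Mathlib
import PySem

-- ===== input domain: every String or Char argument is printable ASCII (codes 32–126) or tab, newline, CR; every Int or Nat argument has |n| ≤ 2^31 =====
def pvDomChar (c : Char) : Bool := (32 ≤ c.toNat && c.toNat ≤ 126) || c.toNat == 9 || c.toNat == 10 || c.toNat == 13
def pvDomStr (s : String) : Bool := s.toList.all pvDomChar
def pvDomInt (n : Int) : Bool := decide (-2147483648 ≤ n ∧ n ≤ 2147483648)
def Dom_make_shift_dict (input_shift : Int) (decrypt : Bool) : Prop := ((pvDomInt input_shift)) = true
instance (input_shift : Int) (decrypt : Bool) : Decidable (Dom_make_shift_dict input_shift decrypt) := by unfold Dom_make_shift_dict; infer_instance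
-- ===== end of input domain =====

-- B replaces A's per-index (i+shift)%26 / %10 writes into mutated list copies by whole-alphabet
-- slice rotation (alpha[k:]+alpha[:k], k = shift % size) zipped with the alphabet (objective: simpler).

-- ===== PORT A =====
-- string.ascii_lowercase / ascii_uppercase / digits
def pvLowerA : List Char := ['a', 'b', 'c', 'd', 'e', 'f', 'g', 'h', 'i', 'j', 'k', 'l', 'm', 'n', 'o', 'p', 'q', 'r', 's', 't', 'u', 'v', 'w', 'x', 'y', 'z']
def pvUpperA : List Char := ['A', 'B', 'C', 'D', 'E', 'F', 'G', 'H', 'I', 'J', 'K', 'L', 'M', 'N', 'O', 'P', 'Q', 'R', 'S', 'T', 'U', 'V', 'W', 'X', 'Y', 'Z']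
def pvDigitsA : List Char := ['0', '1', '2', '3', '4', '5', '6', '7', '8', '9']

-- the body of A after the decrypt negation of input_shift
def pvBodyA (s : Int) : List (String × String) :=
  -- for letter in …: append to the list, then copy the list ('copy = letters[:]' each iteration)
  let pl := pvLowerA.foldl (fun (p : List Char × List Char) c =>
      let l := p.1 ++ [c]; (l, l)) ([], [])
  let lower := pl.1
  let lowerCopy0 := pl.2
  -- for index in range(len(lower)): copy[index] = lower[(index+s)%26]
  let lowerCopy := (PySem.List.pyRange 0 (PySem.List.len lower) 1).foldl
      (fun copy idx => PySem.List.pySetD copy idx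
        (PySem.List.pyGetD lower (PySem.Int.mod (idx + s) 26) 'a')) lowerCopy0
  let pu := pvUpperA.foldl (fun (p : List Char × List Char) c =>
      let l := p.1 ++ [c]; (l, l)) ([], [])
  let upper := pu.1
  let upperCopy0 := pu.2
  let upperCopy := (PySem.List.pyRange 0 (PySem.List.len upper) 1).foldl
      (fun copy idx => PySem.List.pySetD copy idx
        (PySem.List.pyGetD upper (PySem.Int.mod (idx + s) 26) 'a')) upperCopy0
  let pn := pvDigitsA.foldl (fun (p : List Char × List Char) c =>
      let l := p.1 ++ [c]; (l, l)) ([], [])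
  let numbers := pn.1
  let numbersCopy0 := pn.2
  let numbersCopy := (PySem.List.pyRange 0 (PySem.List.len numbers) 1).foldl
      (fun copy idx => PySem.List.pySetD copy idx
        (PySem.List.pyGetD numbers (PySem.Int.mod (idx + s) 10) 'a')) numbersCopy0
  -- three insertion loops into shift_dict
  let d : PySem.Dict String String := PySem.Dict.empty
  let d := (PySem.List.pyRange 0 (PySem.List.len lower) 1).foldl
      (fun d idx => d.insert (String.ofList [PySem.List.pyGetD lower idx 'a'])
        (String.ofList [PySem.List.pyGetD lowerCopy idx 'a'])) d
  let d := (PySem.List.pyRange 0 (PySem.List.len upper) 1).foldl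
      (fun d idx => d.insert (String.ofList [PySem.List.pyGetD upper idx 'a'])
        (String.ofList [PySem.List.pyGetD upperCopy idx 'a'])) d
  let d := (PySem.List.pyRange 0 (PySem.List.len numbers) 1).foldl
      (fun d idx => d.insert (String.ofList [PySem.List.pyGetD numbers idx 'a'])
        (String.ofList [PySem.List.pyGetD numbersCopy idx 'a'])) d
  d.items

def make_shift_dict (input_shift : Int) (decrypt : Bool) : List (String × String) :=
  pvBodyA (if decrypt = true then -input_shift else input_shift)

-- ===== PORT B =====
-- one pass of the 'for alphabet, size in …' loop body: rotate by shift % size and update the dict with zip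
def pvStepB (s : Int) (d : PySem.Dict String String) (alpha : List Char) (size : Int) :
    PySem.Dict String String :=
  let k := PySem.Int.mod s size
  let rot := PySem.List.slice alpha (some k) none ++ PySem.List.slice alpha none (some k)
  (alpha.zip rot).foldl (fun d p => d.insert (String.ofList [p.1]) (String.ofList [p.2])) d

def pvBodyB (s : Int) : List (String × String) :=
  (pvStepB s (pvStepB s (pvStepB s PySem.Dict.empty pvLowerA 26) pvUpperA 26) pvDigitsA 10).items

def make_shift_dict_alt (input_shift : Int) (decrypt : Bool) : List (String × String) :=
  pvBodyB (if decrypt = true then -input_shift else input_shift)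

-- ===== PRECONDITION & SPEC =====
def Spec_make_shift_dict (input_shift : Int) (decrypt : Bool) (out : List (String × String)) : Prop := out = make_shift_dict_alt input_shift decrypt
instance (input_shift : Int) (decrypt : Bool) (out : List (String × String)) : Decidable (Spec_make_shift_dict input_shift decrypt out) := by unfold Spec_make_shift_dict; infer_instance

-- ===== CLAIM (what is proved, stated in full; the proofs are below) =====
def Claim_equal_make_shift_dict : Prop := ∀ (input_shift : Int) (decrypt : Bool), Dom_make_shift_dict input_shift decrypt → Spec_make_shift_dict input_shift decrypt (make_shift_dict input_shift decrypt)

-- ===== LEMMAS AND PROOFS =====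

-- canonical form of one alphabet block: key alpha[i], value alpha[(i+s) % m]
def pvCanon (alpha : List Char) (m s : Int) : List (String × String) :=
  (List.range alpha.length).map (fun i : Nat =>
    (String.ofList [alpha.getD i 'a'], String.ofList [alpha.getD (((i : Int) + s) % m).toNat 'a']))

-- the pySetD write loop over range(len(c)) builds the per-index map
theorem pvSetAll_aux {α : Type} (f : Int → α) (c : List α) (m : Nat) (hm : m ≤ c.length) :
    (PySem.List.pyRange 0 (m : Int) 1).foldl (fun cur i => PySem.List.pySetD cur i (f i)) c
      = (List.range m).map (fun i : Nat => f (i : Int)) ++ c.drop m := by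
  induction m with
  | zero => simp [PySem.List.pyRange_one_eq_nil]
  | succ k ih =>
    rw [show ((k + 1 : Nat) : Int) = (k : Int) + 1 by push_cast; ring,
        PySem.List.pyRange_one_succ_right (by positivity), List.foldl_append]
    rw [ih (by omega)]
    simp only [List.foldl_cons, List.foldl_nil, List.range_succ, List.map_append, List.map_cons,
      List.map_nil]
    have hd := List.drop_eq_getElem_cons (l := c) (i := k) (by omega)
    have hlen : ((List.range k).map (fun i : Nat => f (i:Int)) ++ c.drop k).length = c.length := by
      simp; omega
    rw [PySem.List.pySetD, PySem.List.pySet?, hlen]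
    rw [show PySem.List.pyIdx? c.length (k:Int) = some k by
          simp [PySem.List.pyIdx?]; omega]
    rw [Option.map_some, Option.getD_some, List.set_append]
    rw [if_neg (by simp)]
    simp only [List.length_map, List.length_range, Nat.sub_self, hd, List.set_cons_zero,
      List.append_assoc, List.singleton_append]

theorem pvSetAll {α : Type} (f : Int → α) (c : List α) :
    (PySem.List.pyRange 0 ((c.length : Nat) : Int) 1).foldl
        (fun cur i => PySem.List.pySetD cur i (f i)) c
      = (List.range c.length).map (fun i : Nat => f (i : Int)) := by
  rw [pvSetAll_aux f c c.length le_rfl]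
  simp

theorem pvA_map_eq_canon (alpha : List Char) (m s : Int) (hm : (alpha.length : Int) = m)
    (hpos : 0 < m) :
    (PySem.List.pyRange 0 ((alpha.length : Nat) : Int) 1).map (fun idx =>
        (String.ofList [PySem.List.pyGetD alpha idx 'a'],
         String.ofList [PySem.List.pyGetD
            ((List.range alpha.length).map (fun i : Nat =>
               PySem.List.pyGetD alpha (PySem.Int.mod ((i : Int) + s) m) 'a')) idx 'a']))
      = pvCanon alpha m s := by
  rw [PySem.List.pyRange_one, List.map_map, pvCanon]
  simp only [Int.sub_zero, Int.toNat_natCast]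
  apply List.map_congr_left
  intro i hi
  have hi' : i < alpha.length := List.mem_range.mp hi
  have hmod0 : 0 ≤ ((i:Int) + s) % m := Int.emod_nonneg _ (by omega)
  have hmodlt : ((i:Int) + s) % m < m := Int.emod_lt_of_pos _ hpos
  simp only [Function.comp_apply, Int.zero_add, PySem.List.pyGetD_natCast]
  simp only [Prod.mk.injEq, true_and]
  congr 1
  rw [List.getD_eq_getElem _ _ (by simpa using hi'), List.getElem_map, List.getElem_range,
        PySem.Int.mod_eq_emod_of_pos hpos,
        PySem.List.pyGetD_eq_getElem _ _ hmod0 (by omega),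
        List.getD_eq_getElem _ _ (by omega)]


theorem pvB_zip_eq_canon (alpha : List Char) (m s : Int) (hm : (alpha.length : Int) = m)
    (hpos : 0 < m) :
    (alpha.zip (PySem.List.slice alpha (some (PySem.Int.mod s m)) none ++
                PySem.List.slice alpha none (some (PySem.Int.mod s m)))).map
        (fun p => (String.ofList [p.1], String.ofList [p.2]))
      = pvCanon alpha m s := by
  have hk0 : 0 ≤ PySem.Int.mod s m := PySem.Int.mod_nonneg s hpos
  have hklt : PySem.Int.mod s m < m := PySem.Int.mod_lt s hpos
  have hke : PySem.Int.mod s m = s % m := PySem.Int.mod_eq_emod_of_pos hpos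
  have hkn : (PySem.Int.mod s m).toNat ≤ alpha.length := by omega
  rw [PySem.List.slice_from alpha hk0, PySem.List.slice_to alpha hk0,
      ← List.rotate_eq_drop_append_take hkn]
  apply List.ext_getElem
  · simp [pvCanon]
  · intro i h1 h2
    have hi : i < alpha.length := by simpa [pvCanon] using h2
    have hb0 : 0 ≤ ((i:Int) + s) % m := Int.emod_nonneg _ (by omega)
    have hblt : ((i:Int) + s) % m < m := Int.emod_lt_of_pos _ hpos
    simp only [List.getElem_map, List.getElem_zip, pvCanon, List.getElem_range,
      Prod.mk.injEq]
    constructor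
    · rw [List.getD_eq_getElem _ _ hi]
    · congr 1
      rw [List.getElem_rotate, List.getD_eq_getElem _ _ (by omega)]
      have hkk : (((PySem.Int.mod s m).toNat : Nat) : Int) = s % m := by omega
      have hcast : (((i + (PySem.Int.mod s m).toNat) % alpha.length : Nat) : Int) = ((i:Int) + s) % m := by
        rw [Int.natCast_mod, Int.natCast_add, hkk, hm]
        conv_rhs => rw [Int.add_emod]
        conv_lhs => rw [Int.add_emod]
        simp [Int.emod_emod_of_dvd]
      have hidx : (i + (PySem.Int.mod s m).toNat) % alpha.length = (((i:Int) + s) % m).toNat := by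
        exact_mod_cast congrArg Int.toNat hcast
      simp only [hidx]


-- one dict-filling loop over fresh distinct keys: items append, keys extend
theorem pvStage {β : Type} (l : List β) (k : β → String) (v : β → String)
    (d : PySem.Dict String String) (ks : List String) (hkeys : d.keys = ks)
    (hfresh : ∀ a ∈ l, decide ((k a) ∈ ks) = false) (hnd : (l.map k).Nodup) :
    (l.foldl (fun d a => d.insert (k a) (v a)) d).items = d.items ++ l.map (fun a => (k a, v a))
      ∧ (l.foldl (fun d a => d.insert (k a) (v a)) d).keys = ks ++ l.map k := by
  have hc : ∀ a ∈ l, d.contains (k a) = false := by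
    intro a ha
    rw [PySem.Dict.contains_eq_decide_mem_keys, hkeys]
    exact hfresh a ha
  have hi := PySem.Dict.items_foldl_insert_fresh l k v d hc hnd
  refine ⟨hi, ?_⟩
  simp only [PySem.Dict.keys, hi, List.map_append, List.map_map, ← hkeys]
  rfl

theorem pvBodyA_eq_canon (s : Int) :
    pvBodyA s = pvCanon pvLowerA 26 s ++ pvCanon pvUpperA 26 s ++ pvCanon pvDigitsA 10 s := by
  have hL : pvLowerA.foldl (fun (p : List Char × List Char) c => (p.1 ++ [c], p.1 ++ [c])) ([], [])
      = (pvLowerA, pvLowerA) := by decide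
  have hU : pvUpperA.foldl (fun (p : List Char × List Char) c => (p.1 ++ [c], p.1 ++ [c])) ([], [])
      = (pvUpperA, pvUpperA) := by decide
  have hD : pvDigitsA.foldl (fun (p : List Char × List Char) c => (p.1 ++ [c], p.1 ++ [c])) ([], [])
      = (pvDigitsA, pvDigitsA) := by decide
  simp only [pvBodyA, hL, hU, hD, PySem.List.len_eq]
  rw [pvSetAll (fun i => PySem.List.pyGetD pvLowerA (PySem.Int.mod (i + s) 26) 'a') pvLowerA,
      pvSetAll (fun i => PySem.List.pyGetD pvUpperA (PySem.Int.mod (i + s) 26) 'a') pvUpperA,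
      pvSetAll (fun i => PySem.List.pyGetD pvDigitsA (PySem.Int.mod (i + s) 10) 'a') pvDigitsA]
  have st1 := pvStage (PySem.List.pyRange 0 ((pvLowerA.length : Nat) : Int) 1)
      (fun idx => String.ofList [PySem.List.pyGetD pvLowerA idx 'a'])
      (fun idx => String.ofList [PySem.List.pyGetD ((List.range pvLowerA.length).map
         (fun i : Nat => PySem.List.pyGetD pvLowerA (PySem.Int.mod ((i : Int) + s) 26) 'a')) idx 'a'])
      PySem.Dict.empty [] PySem.Dict.keys_empty (by intro a _; simp) (by decide)
  have st2 := pvStage (PySem.List.pyRange 0 ((pvUpperA.length : Nat) : Int) 1)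
      (fun idx => String.ofList [PySem.List.pyGetD pvUpperA idx 'a'])
      (fun idx => String.ofList [PySem.List.pyGetD ((List.range pvUpperA.length).map
         (fun i : Nat => PySem.List.pyGetD pvUpperA (PySem.Int.mod ((i : Int) + s) 26) 'a')) idx 'a'])
      _ ([] ++ (PySem.List.pyRange 0 ((pvLowerA.length : Nat) : Int) 1).map
          (fun idx => String.ofList [PySem.List.pyGetD pvLowerA idx 'a']))
      st1.2 (by decide) (by decide)
  have st3 := pvStage (PySem.List.pyRange 0 ((pvDigitsA.length : Nat) : Int) 1)
      (fun idx => String.ofList [PySem.List.pyGetD pvDigitsA idx 'a'])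
      (fun idx => String.ofList [PySem.List.pyGetD ((List.range pvDigitsA.length).map
         (fun i : Nat => PySem.List.pyGetD pvDigitsA (PySem.Int.mod ((i : Int) + s) 10) 'a')) idx 'a'])
      _ (([] ++ (PySem.List.pyRange 0 ((pvLowerA.length : Nat) : Int) 1).map
          (fun idx => String.ofList [PySem.List.pyGetD pvLowerA idx 'a'])) ++
         (PySem.List.pyRange 0 ((pvUpperA.length : Nat) : Int) 1).map
          (fun idx => String.ofList [PySem.List.pyGetD pvUpperA idx 'a']))
      st2.2 (by decide) (by decide)
  simp only [st3.1, st2.1, st1.1]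
  simp only [pvA_map_eq_canon pvLowerA 26 s (by decide) (by decide),
      pvA_map_eq_canon pvUpperA 26 s (by decide) (by decide),
      pvA_map_eq_canon pvDigitsA 10 s (by decide) (by decide)]
  simp
  rfl

theorem pvBStage (alpha : List Char) (m s : Int) (hm : (alpha.length : Int) = m) (hpos : 0 < m)
    (d : PySem.Dict String String) (ks : List String) (hkeys : d.keys = ks)
    (hfresh : ∀ c ∈ alpha, decide ((String.ofList [c]) ∈ ks) = false)
    (hnd : (alpha.map (fun c => String.ofList [c])).Nodup) :
    (pvStepB s d alpha m).items = d.items ++ pvCanon alpha m s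
      ∧ (pvStepB s d alpha m).keys = ks ++ alpha.map (fun c => String.ofList [c]) := by
  have hk0 : 0 ≤ PySem.Int.mod s m := PySem.Int.mod_nonneg s hpos
  have hklt : PySem.Int.mod s m < m := PySem.Int.mod_lt s hpos
  have hrot : alpha.length ≤ (PySem.List.slice alpha (some (PySem.Int.mod s m)) none ++
      PySem.List.slice alpha none (some (PySem.Int.mod s m))).length := by
    rw [PySem.List.slice_from alpha hk0, PySem.List.slice_to alpha hk0]
    simp
    omega
  have hmapfst : (alpha.zip (PySem.List.slice alpha (some (PySem.Int.mod s m)) none ++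
      PySem.List.slice alpha none (some (PySem.Int.mod s m)))).map
        (fun p => String.ofList [p.1]) = alpha.map (fun c => String.ofList [c]) := by
    rw [show (fun p : Char × Char => String.ofList [p.1])
          = (fun c => String.ofList [c]) ∘ Prod.fst from rfl]
    rw [← List.map_map, List.map_fst_zip hrot]
  have st := pvStage (alpha.zip (PySem.List.slice alpha (some (PySem.Int.mod s m)) none ++
      PySem.List.slice alpha none (some (PySem.Int.mod s m))))
      (fun p => String.ofList [p.1]) (fun p => String.ofList [p.2]) d ks hkeys
      (fun a ha => hfresh a.1 (List.of_mem_zip ha).1)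
      (by rw [hmapfst]; exact hnd)
  constructor
  · simp only [pvStepB, st.1]
    rw [← pvB_zip_eq_canon alpha m s hm hpos]
  · simp only [pvStepB, st.2, hmapfst]

theorem pvOfListSingleton_inj : Function.Injective (fun c => String.ofList [c]) := by
  intro a b h
  simpa using congrArg String.toList h

theorem pvLowerN : pvLowerA.map Char.toNat = [97, 98, 99, 100, 101, 102, 103, 104, 105, 106, 107, 108, 109, 110, 111, 112, 113, 114, 115, 116, 117, 118, 119, 120, 121, 122] := by rfl
theorem pvUpperN : pvUpperA.map Char.toNat = [65, 66, 67, 68, 69, 70, 71, 72, 73, 74, 75, 76, 77, 78, 79, 80, 81, 82, 83, 84, 85, 86, 87, 88, 89, 90] := by rfl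
theorem pvDigitsN : pvDigitsA.map Char.toNat = [48, 49, 50, 51, 52, 53, 54, 55, 56, 57] := by rfl

theorem pvDisjNat (xs ys : List Char) (h : ∀ n ∈ xs.map Char.toNat, n ∉ ys.map Char.toNat) :
    ∀ c ∈ xs, c ∉ ys := by
  intro c hc hl
  exact h c.toNat (List.mem_map_of_mem hc) (List.mem_map_of_mem hl)

theorem pvDisjLU : ∀ c ∈ pvUpperA, c ∉ pvLowerA :=
  pvDisjNat _ _ (by rw [pvUpperN, pvLowerN]; decide)
theorem pvDisjDL : ∀ c ∈ pvDigitsA, c ∉ pvLowerA :=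
  pvDisjNat _ _ (by rw [pvDigitsN, pvLowerN]; decide)
theorem pvDisjDU : ∀ c ∈ pvDigitsA, c ∉ pvUpperA :=
  pvDisjNat _ _ (by rw [pvDigitsN, pvUpperN]; decide)

theorem pvBodyB_eq_canon (s : Int) :
    pvBodyB s = pvCanon pvLowerA 26 s ++ pvCanon pvUpperA 26 s ++ pvCanon pvDigitsA 10 s := by
  have st1 := pvBStage pvLowerA 26 s (by decide) (by decide) PySem.Dict.empty []
      PySem.Dict.keys_empty (by intro c _; simp)
      (List.Nodup.map pvOfListSingleton_inj (by decide))
  have st2 := pvBStage pvUpperA 26 s (by decide) (by decide) _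
      ([] ++ pvLowerA.map (fun c => String.ofList [c])) st1.2
      (by
        intro c hc
        simp only [List.nil_append, decide_eq_false_iff_not, List.mem_map]
        rintro ⟨a, ha, hEq⟩
        cases pvOfListSingleton_inj hEq
        exact pvDisjLU c hc ha)
      (List.Nodup.map pvOfListSingleton_inj (by decide))
  have st3 := pvBStage pvDigitsA 10 s (by decide) (by decide) _
      (([] ++ pvLowerA.map (fun c => String.ofList [c])) ++
        pvUpperA.map (fun c => String.ofList [c])) st2.2
      (by
        intro c hc
        simp only [List.nil_append, decide_eq_false_iff_not, List.mem_append, List.mem_map]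
        rintro (⟨a, ha, hEq⟩ | ⟨a, ha, hEq⟩) <;> cases pvOfListSingleton_inj hEq
        · exact pvDisjDL c hc ha
        · exact pvDisjDU c hc ha)
      (List.Nodup.map pvOfListSingleton_inj (by decide))
  rw [pvBodyB, st3.1, st2.1, st1.1]
  simp
  rfl

-- ===== VERDICT (by name: the statement is the Claim_ definition above) =====
theorem make_shift_dict_spec : Claim_equal_make_shift_dict := by
  intro i d _
  unfold Spec_make_shift_dict make_shift_dict make_shift_dict_alt
  rw [pvBodyA_eq_canon, pvBodyB_eq_canon]
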